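-- pv_equiv track=rewrite | github.com/DretzHA/ArtigoDataset | 1. Arquivos Python/3. analise_rssi.py | filtrar_arquivos
-- ===== SOURCE A (Python) =====
-- considerar_arquivos = {
--     "ORT": False,
--     "SYLABS": False,
--     "UBLOX": False,
--     "4T": False,
--     "3T": False,
--     "OUTROS": True
-- }
--
-- def filtrar_arquivos(data_files):
--     # Filtrar arquivos específicos
--     if considerar_arquivos["ORT"] and not considerar_arquivos["4T"]:
--         data_files = [f for f in data_files if f.startswith('ORT')]
--     elif not considerar_arquivos["ORT"] and considerar_arquivos["4T"]:
--         data_files = [f for f in data_files if '4T' in f and not f.startswith('ORT')]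
--     else:
--         if not considerar_arquivos["ORT"]:
--             data_files = [f for f in data_files if not f.startswith('ORT')]
--         if not considerar_arquivos["SYLABS"]:
--             data_files = [f for f in data_files if 'SYLABS' not in f]
--         if not considerar_arquivos["UBLOX"]:
--             data_files = [f for f in data_files if 'UBLOX' not in f]
--         if not considerar_arquivos["4T"]:
--             data_files = [f for f in data_files if '4T' not in f]
--         if not considerar_arquivos["3T"]:
--             data_files = [f for f in data_files if '3T' not in f]
--
--     # Excluir arquivos "OUTROS" se considerar_arquivos["OUTROS"] for False
--     if not considerar_arquivos["OUTROS"]: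
--         data_files = [f for f in data_files if (
--             f.startswith('ORT') or
--             'SYLABS' in f or
--             'UBLOX' in f or
--             '4T' in f or
--             '3T' in f
--         )]
--
--     return data_files
-- ===== SOURCE B (Python) =====
-- considerar_arquivos = {
--     "ORT": False,
--     "SYLABS": False,
--     "UBLOX": False,
--     "4T": False,
--     "3T": False,
--     "OUTROS": True
-- }
--
-- def filtrar_arquivos(data_files):
--     # Single pass: build one keep(f) predicate from the config once,
--     # then filter the list in a single traversal.
--     cfg = considerar_arquivos
--     if cfg["ORT"] and not cfg["4T"]:
--         def branch_keep(f):
--             return f.startswith('ORT')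
--     elif not cfg["ORT"] and cfg["4T"]:
--         def branch_keep(f):
--             return '4T' in f and not f.startswith('ORT')
--     else:
--         def branch_keep(f):
--             return ((cfg["ORT"] or not f.startswith('ORT'))
--                     and (cfg["SYLABS"] or 'SYLABS' not in f)
--                     and (cfg["UBLOX"] or 'UBLOX' not in f)
--                     and (cfg["4T"] or '4T' not in f)
--                     and (cfg["3T"] or '3T' not in f))
--
--     def keep(f):
--         return branch_keep(f) and (cfg["OUTROS"] or f.startswith('ORT')
--                                    or 'SYLABS' in f or 'UBLOX' in f
--                                    or '4T' in f or '3T' in f)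
--
--     return [f for f in data_files if keep(f)]
-- ===== Notes on version B (the rewrite author's own statement) =====
-- stated objective: simpler
-- what changed: Replaces A's cascade of up to six sequential list comprehensions (one new intermediate list per enabled filter) with a single keep(f) predicate assembled once from the config and one list traversal.
import Mathlib
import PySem

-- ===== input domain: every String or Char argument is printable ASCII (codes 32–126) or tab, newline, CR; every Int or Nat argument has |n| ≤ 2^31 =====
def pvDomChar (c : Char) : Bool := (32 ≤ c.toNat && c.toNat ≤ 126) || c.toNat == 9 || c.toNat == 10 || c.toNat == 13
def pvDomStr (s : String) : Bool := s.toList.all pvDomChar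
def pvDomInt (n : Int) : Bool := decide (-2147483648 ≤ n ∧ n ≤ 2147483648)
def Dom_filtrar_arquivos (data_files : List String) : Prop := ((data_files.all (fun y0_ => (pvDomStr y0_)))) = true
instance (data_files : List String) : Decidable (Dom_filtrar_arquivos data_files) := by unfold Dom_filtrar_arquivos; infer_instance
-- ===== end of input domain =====

-- B replaces A's cascade of sequential list-comprehension passes by one keep(f) predicate and a single traversal (objective: simpler).


-- ===== PORT A =====
-- module-level config dict (all lookups hit existing keys; getD with default false is exact here)
def considerar_arquivos : PySem.Dict String Bool :=
  PySem.Dict.ofList [("ORT", false), ("SYLABS", false), ("UBLOX", false), ("4T", false), ("3T", false), ("OUTROS", true)]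

def filtrar_arquivos (data_files : List String) : List String :=
  let data_files :=
    if considerar_arquivos.getD "ORT" false && !(considerar_arquivos.getD "4T" false) then
      data_files.filter (fun f => PySem.Str.startswith f "ORT")
    else if !(considerar_arquivos.getD "ORT" false) && considerar_arquivos.getD "4T" false then
      data_files.filter (fun f => PySem.Str.isIn "4T" f && !(PySem.Str.startswith f "ORT"))
    else
      let data_files := if !(considerar_arquivos.getD "ORT" false) then
        data_files.filter (fun f => !(PySem.Str.startswith f "ORT")) else data_files
      let data_files := if !(considerar_arquivos.getD "SYLABS" false) then
        data_files.filter (fun f => !(PySem.Str.isIn "SYLABS" f)) else data_files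
      let data_files := if !(considerar_arquivos.getD "UBLOX" false) then
        data_files.filter (fun f => !(PySem.Str.isIn "UBLOX" f)) else data_files
      let data_files := if !(considerar_arquivos.getD "4T" false) then
        data_files.filter (fun f => !(PySem.Str.isIn "4T" f)) else data_files
      let data_files := if !(considerar_arquivos.getD "3T" false) then
        data_files.filter (fun f => !(PySem.Str.isIn "3T" f)) else data_files
      data_files
  if !(considerar_arquivos.getD "OUTROS" false) then
    data_files.filter (fun f => PySem.Str.startswith f "ORT" || PySem.Str.isIn "SYLABS" f ||
      PySem.Str.isIn "UBLOX" f || PySem.Str.isIn "4T" f || PySem.Str.isIn "3T" f)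
  else data_files

-- ===== PORT B =====
def pvCfg : PySem.Dict String Bool :=
  PySem.Dict.ofList [("ORT", false), ("SYLABS", false), ("UBLOX", false), ("4T", false), ("3T", false), ("OUTROS", true)]

def pvBranchKeep (f : String) : Bool :=
  if pvCfg.getD "ORT" false && !(pvCfg.getD "4T" false) then
    PySem.Str.startswith f "ORT"
  else if !(pvCfg.getD "ORT" false) && pvCfg.getD "4T" false then
    PySem.Str.isIn "4T" f && !(PySem.Str.startswith f "ORT")
  else
    (pvCfg.getD "ORT" false || !(PySem.Str.startswith f "ORT")) &&
    (pvCfg.getD "SYLABS" false || !(PySem.Str.isIn "SYLABS" f)) &&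
    (pvCfg.getD "UBLOX" false || !(PySem.Str.isIn "UBLOX" f)) &&
    (pvCfg.getD "4T" false || !(PySem.Str.isIn "4T" f)) &&
    (pvCfg.getD "3T" false || !(PySem.Str.isIn "3T" f))

def pvKeep (f : String) : Bool :=
  pvBranchKeep f && (pvCfg.getD "OUTROS" false || PySem.Str.startswith f "ORT" ||
    PySem.Str.isIn "SYLABS" f || PySem.Str.isIn "UBLOX" f ||
    PySem.Str.isIn "4T" f || PySem.Str.isIn "3T" f)

def filtrar_arquivos_alt (data_files : List String) : List String :=
  data_files.filter pvKeep

-- ===== PRECONDITION & SPEC =====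
def Spec_filtrar_arquivos (data_files : List String) (out : List String) : Prop := out = filtrar_arquivos_alt data_files
instance (data_files : List String) (out : List String) : Decidable (Spec_filtrar_arquivos data_files out) := by unfold Spec_filtrar_arquivos; infer_instance

-- ===== CLAIM (what is proved, stated in full; the proofs are below) =====
def Claim_equal_filtrar_arquivos : Prop := ∀ (data_files : List String), Dom_filtrar_arquivos data_files → Spec_filtrar_arquivos data_files (filtrar_arquivos data_files)

-- ===== LEMMAS AND PROOFS =====
theorem pv_cfg_ORT : considerar_arquivos.getD "ORT" false = false := by decide
theorem pv_cfg_SYLABS : considerar_arquivos.getD "SYLABS" false = false := by decide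
theorem pv_cfg_UBLOX : considerar_arquivos.getD "UBLOX" false = false := by decide
theorem pv_cfg_4T : considerar_arquivos.getD "4T" false = false := by decide
theorem pv_cfg_3T : considerar_arquivos.getD "3T" false = false := by decide
theorem pv_cfg_OUTROS : considerar_arquivos.getD "OUTROS" false = true := by decide

theorem pv_pointwise (xs : List String) : filtrar_arquivos xs = filtrar_arquivos_alt xs := by
  simp only [filtrar_arquivos, filtrar_arquivos_alt, pv_cfg_ORT, pv_cfg_SYLABS, pv_cfg_UBLOX,
    pv_cfg_4T, pv_cfg_3T, pv_cfg_OUTROS, Bool.and_false, Bool.not_false, Bool.not_true,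
    Bool.and_true, if_true, if_false, Bool.false_eq_true, List.filter_filter]
  refine List.filter_congr ?_
  intro x _
  simp only [pvKeep, pvBranchKeep, pvCfg, pv_cfg_ORT, pv_cfg_SYLABS, pv_cfg_UBLOX,
    pv_cfg_4T, pv_cfg_3T, pv_cfg_OUTROS]
  cases PySem.Str.startswith x "ORT" <;> cases PySem.Str.isIn "SYLABS" x <;>
    cases PySem.Str.isIn "UBLOX" x <;> cases PySem.Str.isIn "4T" x <;>
    cases PySem.Str.isIn "3T" x <;> rfl
-- ===== VERDICT (by name: the statement is the Claim_ definition above) =====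
theorem filtrar_arquivos_spec : Claim_equal_filtrar_arquivos := by
  intro xs _
  exact pv_pointwise xs
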